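-- pv_equiv track=rewrite | github.com/pelmenx/courses | Daily Coding Problem/Solutions/Daily Coding Problem: Problem #32 [Hard].py | permutations_update
-- ===== SOURCE A (Python) =====
-- def permutations_update(list):
--     new_list = []
--     for i in range(0, len(list)):
--         tmp = []
--         for j in range(0, len(list[i])):
--             if j != (len(list[i]) - 1):
--                 tmp.append([list[i][j], list[i][j + 1]])
--             else:
--                 tmp.append([list[i][j], list[i][0]])
--         new_list.append(tmp)
--     return(new_list)
-- ===== SOURCE B (Python) =====
-- def permutations_update(list):
--     def row(first, rest):
--         if len(rest) == 1:
--             return [[rest[0], first]]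
--         return [[rest[0], rest[1]]] + row(first, rest[1:])
--
--     def go(ls):
--         if not ls:
--             return []
--         sub = ls[0]
--         return [row(sub[0], sub) if sub else []] + go(ls[1:])
--
--     return go(list)
-- ===== Notes on version B (the rewrite author's own statement) =====
-- stated objective: alternative
-- what changed: Replaces the index-driven nested loops and their explicit wraparound branch by structural recursion on both levels: an inner recursion peels the sublist while carrying its first element down, so the closing pair [last, first] emerges at the singleton base case with no index arithmetic at all.
import Mathlib
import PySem

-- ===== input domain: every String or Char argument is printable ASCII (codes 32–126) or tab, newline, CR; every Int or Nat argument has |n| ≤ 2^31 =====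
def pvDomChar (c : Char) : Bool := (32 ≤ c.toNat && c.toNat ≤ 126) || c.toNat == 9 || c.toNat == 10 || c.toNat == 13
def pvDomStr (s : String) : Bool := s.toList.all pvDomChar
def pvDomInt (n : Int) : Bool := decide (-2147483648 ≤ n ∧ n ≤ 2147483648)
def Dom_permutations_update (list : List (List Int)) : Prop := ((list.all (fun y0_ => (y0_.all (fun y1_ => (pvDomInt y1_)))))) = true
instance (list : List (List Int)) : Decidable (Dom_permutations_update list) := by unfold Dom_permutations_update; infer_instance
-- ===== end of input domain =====

-- B replaces the index loops and the wraparound branch by structural recursion that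
-- carries the sublist's first element down to the singleton base case (alternative; same cost).

-- ===== PORT A =====
-- inner loop: for j in range(0, len(l)): if j != len(l)-1: tmp.append([l[j], l[j+1]]) else: tmp.append([l[j], l[0]])
def pvRowA (l : List Int) : List (List Int) :=
  (PySem.List.pyRange 0 (l.length : Int) 1).foldl (fun tmp j =>
    if j ≠ (l.length : Int) - 1 then
      tmp ++ [[PySem.List.pyGetD l j 0, PySem.List.pyGetD l (j + 1) 0]]
    else
      tmp ++ [[PySem.List.pyGetD l j 0, PySem.List.pyGetD l 0 0]]) []

def permutations_update (list : List (List Int)) : List (List (List Int)) :=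
  (PySem.List.pyRange 0 (list.length : Int) 1).foldl (fun new_list i =>
    new_list ++ [pvRowA (PySem.List.pyGetD list i [])]) []

-- ===== PORT B =====
-- def row(first, rest): if len(rest)==1: return [[rest[0], first]]; return [[rest[0], rest[1]]] + row(first, rest[1:])
-- (row is only ever called with a non-empty rest; the [] case is unreachable and returns [])
def pvRowB (first : Int) : List Int → List (List Int)
  | [] => []
  | [x] => [[x, first]]
  | x :: y :: rest => [x, y] :: pvRowB first (y :: rest)

-- def go(ls): if not ls: return []; sub = ls[0]; return [row(sub[0], sub) if sub else []] + go(ls[1:])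
def pvGoB : List (List Int) → List (List (List Int))
  | [] => []
  | sub :: ls => (match sub with | [] => [] | h :: _ => pvRowB h sub) :: pvGoB ls

def permutations_update_alt (list : List (List Int)) : List (List (List Int)) :=
  pvGoB list

-- ===== PRECONDITION & SPEC =====
def Spec_permutations_update (list : List (List Int)) (out : List (List (List Int))) : Prop := out = permutations_update_alt list
instance (list : List (List Int)) (out : List (List (List Int))) : Decidable (Spec_permutations_update list out) := by unfold Spec_permutations_update; infer_instance

-- ===== CLAIM (what is proved, stated in full; the proofs are below) =====
def Claim_equal_permutations_update : Prop := ∀ (list : List (List Int)), Dom_permutations_update list → Spec_permutations_update list (permutations_update list)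

-- ===== LEMMAS AND PROOFS =====

-- the common index-map form both inner passes are reduced to
def pvPairAt (l : List Int) (k : Nat) : List Int :=
  if (k : Int) ≠ (l.length : Int) - 1 then [l.getD k 0, l.getD (k + 1) 0]
  else [l.getD k 0, l.getD 0 0]

-- A's inner loop, written as a map over indices
theorem pvRowA_eq_map (l : List Int) :
    pvRowA l = (List.range l.length).map (pvPairAt l) := by
  unfold pvRowA
  rw [show (PySem.List.pyRange 0 (l.length : Int) 1).foldl (fun tmp j =>
        if j ≠ (l.length : Int) - 1 then
          tmp ++ [[PySem.List.pyGetD l j 0, PySem.List.pyGetD l (j + 1) 0]]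
        else
          tmp ++ [[PySem.List.pyGetD l j 0, PySem.List.pyGetD l 0 0]])
        ([] : List (List Int))
      = (PySem.List.pyRange 0 (l.length : Int) 1).foldl (fun tmp j =>
          tmp ++ [if j ≠ (l.length : Int) - 1 then
              [PySem.List.pyGetD l j 0, PySem.List.pyGetD l (j + 1) 0]
            else
              [PySem.List.pyGetD l j 0, PySem.List.pyGetD l 0 0]])
          ([] : List (List Int))
      from PySem.List.foldl_congr_mem _ _ _ _
        (fun acc j _ => by by_cases h : j ≠ (l.length : Int) - 1 <;> simp [h])]
  rw [PySem.List.foldl_append_singleton_eq_map, PySem.List.pyRange_zero_natCast,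
    List.map_map, List.nil_append]
  refine List.map_congr_left fun k _ => ?_
  show (if ((k : Nat) : Int) ≠ (l.length : Int) - 1 then _ else _) = pvPairAt l k
  have hc : ((k : Nat) : Int) + 1 = ((k + 1 : Nat) : Int) := by push_cast; ring
  unfold pvPairAt
  rw [hc]
  simp only [PySem.List.pyGetD_natCast, PySem.List.pyGetD_zero]

-- B's recursion, first written as a zip against tail ++ [first]
theorem pvRowB_eq_zip (first : Int) (l : List Int) :
    pvRowB first l = (l.zip (l.tail ++ [first])).map (fun p => [p.1, p.2]) := by
  induction l with
  | nil => rfl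
  | cons x xs ih =>
    cases xs with
    | nil => rfl
    | cons y rest =>
      show [x, y] :: pvRowB first (y :: rest)
        = ((x, y) :: (y :: rest).zip (rest ++ [first])).map (fun p => [p.1, p.2])
      rw [ih]; simp

-- B's inner pass on a non-empty list, as the same map over indices
theorem pvRowB_eq_map (x : Int) (xs : List Int) :
    pvRowB x (x :: xs) = (List.range (x :: xs).length).map (pvPairAt (x :: xs)) := by
  rw [pvRowB_eq_zip, List.tail_cons]
  apply List.ext_getElem
  · simp
  · intro i h1 h2
    have hi : i < xs.length + 1 := by simpa using h2
    simp only [List.getElem_map, List.getElem_zip, List.getElem_range]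
    unfold pvPairAt
    by_cases hlast : i = xs.length
    · subst hlast
      rw [if_neg (by simp)]
      simp [List.getD_eq_getElem?_getD]; rfl
    · have hix : i < xs.length := by omega
      rw [if_pos (by simp only [List.length_cons]; push_cast; omega)]
      simp [hix, List.getD_eq_getElem?_getD, hi, Nat.succ_lt_succ hix]; rfl

-- B's outer recursion, as a map
theorem pvGoB_eq_map (ls : List (List Int)) :
    pvGoB ls = ls.map (fun sub => (List.range sub.length).map (pvPairAt sub)) := by
  induction ls with
  | nil => rfl
  | cons sub rest ih =>
    simp only [pvGoB, List.map_cons, ih]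
    congr 1
    cases sub with
    | nil => rfl
    | cons h t => exact pvRowB_eq_map h t

-- ===== VERDICT (by name: the statement is the Claim_ definition above) =====
theorem permutations_update_spec : Claim_equal_permutations_update := by
  intro list _
  show permutations_update list = permutations_update_alt list
  unfold permutations_update permutations_update_alt
  rw [PySem.List.foldl_append_singleton_eq_map, List.nil_append, pvGoB_eq_map]
  have houter : (PySem.List.pyRange 0 (list.length : Int) 1).map
      (fun i => pvRowA (PySem.List.pyGetD list i [])) = list.map pvRowA := by
    have := PySem.List.map_pyGetD_pyRange_zero' (xs := list) (d := ([] : List Int))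
    calc (PySem.List.pyRange 0 (list.length : Int) 1).map
          (fun i => pvRowA (PySem.List.pyGetD list i []))
        = ((PySem.List.pyRange 0 (list.length : Int) 1).map
            (fun i => PySem.List.pyGetD list i [])).map pvRowA := by rw [List.map_map]; rfl
      _ = list.map pvRowA := by rw [this]
  rw [houter]
  exact List.map_congr_left fun l _ => pvRowA_eq_map l
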